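-- pv_equiv track=rewrite | github.com/hamdiranu/cobarepo | Struktur Data/Problem 2/5 - Initial Group Descending.py | initialGroupingDescending
-- ===== SOURCE A (Python) =====
-- def initialGroupingDescending(studentArr) :
--     awalhrf=[]
--     output=[]
--     for i in studentArr:
--         awalhrf.append(i[0])
--     awalhrf=list(set(awalhrf))
--     ganti = True
--     while ganti == True:
--         ganti = False
--         for i in range(len(awalhrf)-1):
--             vardumb=0
--             if awalhrf[i+1]>awalhrf[i]:
--                 vardumb = awalhrf[i]
--                 awalhrf[i] = awalhrf[i+1]
--                 awalhrf[i+1] = vardumb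
--                 ganti = True
--     for i in awalhrf:
--         new_list=[]
--         new_list.append(i)
--         for h in studentArr:
--             if h[0]==i:
--                 new_list.append(h)
--         output.append(new_list)
--     return output
-- ===== SOURCE B (Python) =====
-- def initialGroupingDescending(studentArr):
--     groups = {}
--     for s in studentArr:
--         groups.setdefault(s[0], []).append(s)
--     return [[c] + groups[c] for c in sorted(groups, reverse=True)]
-- ===== Notes on version B (the rewrite author's own statement) =====
-- stated objective: faster
-- what changed: Replaces the hand-written swap-until-no-change bubble sort over the distinct initials and the per-letter rescans of the input with a single dict-grouping pass plus a library sort of the keys in reverse.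
import Mathlib
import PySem

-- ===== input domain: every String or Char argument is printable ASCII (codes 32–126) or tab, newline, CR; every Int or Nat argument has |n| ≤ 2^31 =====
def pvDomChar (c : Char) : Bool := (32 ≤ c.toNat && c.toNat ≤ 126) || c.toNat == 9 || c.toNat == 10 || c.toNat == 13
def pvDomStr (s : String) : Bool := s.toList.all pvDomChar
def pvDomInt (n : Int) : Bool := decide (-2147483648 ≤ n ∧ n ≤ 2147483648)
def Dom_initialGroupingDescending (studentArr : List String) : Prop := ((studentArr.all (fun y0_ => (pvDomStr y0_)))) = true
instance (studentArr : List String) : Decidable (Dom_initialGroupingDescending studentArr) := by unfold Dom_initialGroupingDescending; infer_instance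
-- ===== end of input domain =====

-- B replaces A's swap-until-stable bubble sort of the distinct initials and its per-letter rescans of the
-- input by one dict-grouping pass plus a library sort of the keys in reverse (objective: faster).

-- ===== PORT A =====
-- s[0] (Pre_ guarantees every string is nonempty, so the default is never used)
def pvFirstChar (s : String) : Char := (PySem.Str.pyGet? s 0).getD ' '

-- one execution of A's inner 'for i in range(len(awalhrf)-1)' pass of adjacent compare-and-swap;
-- returns the rearranged list and the final value of 'ganti' for this pass
def pvPassA : List Char → List Char × Bool
  | [] => ([], false)
  | [a] => ([a], false)
  | a :: b :: t =>
    if a < b then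
      let r := pvPassA (a :: t)
      (b :: r.1, true)
    else
      let r := pvPassA (b :: t)
      (a :: r.1, r.2)

-- number of ascending pairs: the termination measure for A's 'while ganti' loop
def pvInv : List Char → Nat
  | [] => 0
  | a :: t => t.countP (fun x => a < x) + pvInv t

theorem pvPassA_perm (l : List Char) : (pvPassA l).1.Perm l := by
  match l with
  | [] => simp [pvPassA]
  | [a] => simp [pvPassA]
  | a :: b :: t =>
    simp only [pvPassA]
    split
    · exact ((pvPassA_perm (a :: t)).cons b).trans (List.Perm.swap a b t)
    · exact (pvPassA_perm (b :: t)).cons a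

theorem pvPassA_inv (l : List Char) :
    pvInv (pvPassA l).1 ≤ pvInv l ∧ ((pvPassA l).2 = true → pvInv (pvPassA l).1 < pvInv l) := by
  match l with
  | [] => simp [pvPassA]
  | [a] => simp [pvPassA]
  | a :: b :: t =>
    simp only [pvPassA]
    split
    · rename_i hab
      have ih := pvPassA_inv (a :: t)
      have hperm := pvPassA_perm (a :: t)
      have hcount : (pvPassA (a :: t)).1.countP (fun x => b < x) = (a :: t).countP (fun x => b < x) :=
        hperm.countP_eq _
      constructor
      · simp only [pvInv, hcount]
        simp only [List.countP_cons, pvInv] at *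
        have : ¬ (b < a) := fun h => absurd (h.trans hab) (lt_irrefl b)
        simp [hab, this] at *
        omega
      · intro _
        simp only [pvInv, hcount]
        simp only [List.countP_cons, pvInv] at *
        have : ¬ (b < a) := fun h => absurd (h.trans hab) (lt_irrefl b)
        simp [hab, this] at *
        omega
    · rename_i hab
      have ih := pvPassA_inv (b :: t)
      have hperm := pvPassA_perm (b :: t)
      have hcount : (pvPassA (b :: t)).1.countP (fun x => a < x) = (b :: t).countP (fun x => a < x) :=
        hperm.countP_eq _
      constructor
      · simp only [pvInv, hcount, List.countP_cons]
        simp only [pvInv] at ih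
        omega
      · intro hs
        simp only [pvInv, hcount, List.countP_cons]
        simp only [pvInv] at ih
        have := ih.2 hs
        omega

-- A's 'while ganti == True' loop: repeat the pass until it makes no swap
def pvBubbleA (l : List Char) : List Char :=
  let p := pvPassA l
  if p.2 then pvBubbleA p.1 else p.1
termination_by pvInv l
decreasing_by exact (pvPassA_inv l).2 (by assumption)

def initialGroupingDescending (studentArr : List String) : List (List String) :=
  -- awalhrf = first letters; list(set(...)); bubble-sort it descending; then group by rescanning studentArr
  let awalhrf0 := studentArr.foldl (fun acc i => acc ++ [pvFirstChar i]) []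
  let awalhrf := pvBubbleA (PySem.Set.ofList awalhrf0)
  awalhrf.foldl
    (fun output i =>
      output ++ [String.singleton i ::
        studentArr.foldl (fun nl h => if pvFirstChar h == i then nl ++ [h] else nl) []])
    []

-- ===== PORT B =====
def initialGroupingDescending_alt (studentArr : List String) : List (List String) :=
  let groups := studentArr.foldl
    (fun d s => d.modify (pvFirstChar s) [] (fun v => v ++ [s]))   -- groups.setdefault(s[0], []).append(s)
    (PySem.Dict.empty : PySem.Dict Char (List String))
  (PySem.List.sorted groups.keys (fun c => c) true).map
    (fun c => String.singleton c :: groups.getD c [])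

-- ===== PRECONDITION & SPEC =====
-- Pre_ excludes exactly the inputs containing an empty string, where Python A raises IndexError on s[0] (B does too).
def Pre_initialGroupingDescending (studentArr : List String) : Prop := ∀ s ∈ studentArr, s ≠ ""
instance (studentArr : List String) : Decidable (Pre_initialGroupingDescending studentArr) := by
  unfold Pre_initialGroupingDescending; infer_instance
def pvWitness_initialGroupingDescending : List String := ["banana", "apple", "Avocado", "cherry", "b"]

def Spec_initialGroupingDescending (studentArr : List String) (out : List (List String)) : Prop := out = initialGroupingDescending_alt studentArr
instance (studentArr : List String) (out : List (List String)) : Decidable (Spec_initialGroupingDescending studentArr out) := by unfold Spec_initialGroupingDescending; infer_instance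

-- ===== CLAIM (what is proved, stated in full; the proofs are below) =====
def Claim_equal_initialGroupingDescending : Prop := ∀ (studentArr : List String), Dom_initialGroupingDescending studentArr → Pre_initialGroupingDescending studentArr → Spec_initialGroupingDescending studentArr (initialGroupingDescending studentArr)

-- ===== LEMMAS AND PROOFS =====

theorem pvPassA_false_eq (l : List Char) (h : (pvPassA l).2 = false) : (pvPassA l).1 = l := by
  match l with
  | [] => simp [pvPassA]
  | [a] => simp [pvPassA]
  | a :: b :: t =>
    by_cases hab : a < b
    · simp [pvPassA, hab] at h
    · simp only [pvPassA, if_neg hab] at h ⊢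
      simp [pvPassA_false_eq (b :: t) h]

theorem pvPassA_false_chain (l : List Char) (h : (pvPassA l).2 = false) :
    l.IsChain (fun a b => b ≤ a) := by
  match l with
  | [] => simp
  | [a] => simp
  | a :: b :: t =>
    simp only [pvPassA] at h
    split at h
    · simp at h
    · rename_i hab
      simp only at h
      refine (pvPassA_false_chain (b :: t) h).cons ?_
      intro y hy
      simp only [List.head?_cons, Option.mem_some_iff] at hy
      subst hy
      exact le_of_not_gt hab

theorem pvBubbleA_perm (l : List Char) : (pvBubbleA l).Perm l := by
  rw [pvBubbleA]
  split
  · exact (pvBubbleA_perm _).trans (pvPassA_perm l)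
  · exact pvPassA_perm l
termination_by pvInv l
decreasing_by exact (pvPassA_inv l).2 (by assumption)

theorem pvBubbleA_chain (l : List Char) : (pvBubbleA l).IsChain (fun a b => b ≤ a) := by
  rw [pvBubbleA]
  split
  · exact pvBubbleA_chain _
  · rename_i h
    rw [pvPassA_false_eq l (by simpa using h)]
    exact pvPassA_false_chain l (by simpa using h)
termination_by pvInv l
decreasing_by exact (pvPassA_inv l).2 (by assumption)

-- negating the code point turns "descending" into "≤ on the key"; it is injective on Char
def pvNegKey (c : Char) : Int := -(c.toNat : Int)

theorem pvNegKey_inj : Function.Injective pvNegKey := by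
  intro a b h
  simp only [pvNegKey, neg_inj, Int.natCast_inj] at h
  exact Char.ext (UInt32.toNat_inj.mp h)

-- A's bubble loop computes sorted(·, reverse=True)
theorem pvBubbleA_eq_sorted (l : List Char) :
    pvBubbleA l = PySem.List.sorted l (fun c => c) true := by
  apply PySem.List.eq_of_perm_of_pairwise_le_of_injective pvNegKey pvNegKey_inj
  · exact (pvBubbleA_perm l).trans (PySem.List.sorted_perm l (fun c => c) true).symm
  · refine (pvBubbleA_chain l).pairwise.imp ?_
    intro a b h
    simp only [pvNegKey, neg_le_neg_iff, Int.ofNat_le]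
    exact h
  · refine (PySem.List.sorted_pairwise_rev l (fun c => c)).imp ?_
    intro a b h
    simp only [pvNegKey, neg_le_neg_iff, Int.ofNat_le]
    exact h

-- the grouping dict's value at c is the subsequence of studentArr whose first char is c
theorem pvGroups_getD (xs : List String) (d : PySem.Dict Char (List String)) (c : Char) :
    (xs.foldl (fun d s => d.modify (pvFirstChar s) [] (fun v => v ++ [s])) d).getD c []
      = d.getD c [] ++ xs.filter (fun s => pvFirstChar s == c) := by
  induction xs generalizing d with
  | nil => simp
  | cons x t ih =>
    simp only [List.foldl_cons, List.filter_cons, ih]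
    rw [PySem.Dict.getD_modify]
    by_cases hc : pvFirstChar x = c
    · simp [hc]
    · have : (pvFirstChar x == c) = false := by simp [hc]
      simp [this, Ne.symm hc]

theorem pvGroups_keys (xs : List String) :
    (xs.foldl (fun d s => d.modify (pvFirstChar s) [] (fun v => v ++ [s]))
      (PySem.Dict.empty : PySem.Dict Char (List String))).keys
      = PySem.Set.ofList (xs.map pvFirstChar) := by
  rw [PySem.Dict.keys_foldl_modify_key]
  simp [PySem.Set.update, PySem.Set.ofList_eq_foldl, PySem.Dict.keys_empty]

-- ===== VERDICT (by name: the statement is the Claim_ definition above) =====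
theorem initialGroupingDescending_spec : Claim_equal_initialGroupingDescending := by
  intro studentArr _ _
  unfold Spec_initialGroupingDescending initialGroupingDescending initialGroupingDescending_alt
  simp only [PySem.List.foldl_append_singleton_eq_map, List.nil_append]
  rw [pvGroups_keys, pvBubbleA_eq_sorted]
  apply List.map_congr_left
  intro c _
  rw [pvGroups_getD]
  simp only [PySem.Dict.getD_empty, List.nil_append]
  congr 1
  rw [PySem.List.foldl_append_if_eq_filter]
  simp
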